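-- pv_equiv track=rewrite | github.com/quinn-sasha/coding-interview-university | SICP/problem/problem1.py | replace_item_with_sum_of_two_largest
-- ===== SOURCE A (Python) =====
-- def replace_item_with_sum_of_two_largest(lst):
--     """Replace each element of list with sum of two largest num
--        after the element.
--        Element will be -1 if there is not enough numbers.
--
--     >>> replace_item_with_sum_of_two_largest([2, 3, 4, 1, 5])
--     [9, 9, 6, -1, -1]
--     """
--
--     def find_two_largest_num(lst):
--         max, sec_max = 0, 0
--         for n in lst:
--             if n > max:
--                 max, sec_max = n, max
--             elif n > sec_max:
--                 sec_max = n
--         return max, sec_max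
--
--     length = len(lst)
--     for i in range(length):
--         rest = lst[i + 1:]
--         if i > length - 3:
--             lst[i] = -1
--         else:
--             max, sec_max = find_two_largest_num(rest)
--             lst[i] = max + sec_max
--     return lst
-- ===== SOURCE B (Python) =====
-- def replace_item_with_sum_of_two_largest(lst):
--     """Replace each element of list with sum of two largest num
--        after the element (two-largest tracker starts at 0, as in the
--        original); element is -1 if fewer than two numbers follow.
--        Single right-to-left pass; mutates lst in place like the original."""
--     n = len(lst)
--     mx, sec = 0, 0
--     for i in range(n - 1, -1, -1):
--         v = lst[i]
--         lst[i] = -1 if n - i - 1 < 2 else mx + sec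
--         if v > mx:
--             mx, sec = v, mx
--         elif v > sec:
--             sec = v
--     return lst
-- ===== Notes on version B (the rewrite author's own statement) =====
-- stated objective: faster
-- what changed: Replaced the per-index rescan of the whole suffix (slice + two-largest fold for every position) by a single right-to-left pass that maintains the two largest values seen so far.
import Mathlib
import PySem

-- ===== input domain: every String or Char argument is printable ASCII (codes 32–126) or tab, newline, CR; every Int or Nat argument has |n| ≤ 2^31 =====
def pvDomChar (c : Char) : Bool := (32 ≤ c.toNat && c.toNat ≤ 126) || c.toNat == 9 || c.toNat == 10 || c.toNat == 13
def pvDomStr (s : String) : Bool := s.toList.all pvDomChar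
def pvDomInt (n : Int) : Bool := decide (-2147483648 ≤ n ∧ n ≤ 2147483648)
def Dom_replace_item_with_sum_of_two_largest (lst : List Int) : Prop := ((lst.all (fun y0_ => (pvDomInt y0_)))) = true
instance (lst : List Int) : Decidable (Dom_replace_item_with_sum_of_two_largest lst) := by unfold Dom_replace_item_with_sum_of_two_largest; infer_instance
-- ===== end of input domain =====

-- B replaces A's per-index suffix rescan (O(n^2)) by one right-to-left pass keeping the two
-- largest values seen so far (O(n)); return value identical (both Pythons also mutate lst in place).

-- ===== PORT A =====
-- tracker update of find_two_largest_num's loop body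
def pvStep (p : Int × Int) (n : Int) : Int × Int :=
  if n > p.1 then (n, p.1) else if n > p.2 then (p.1, n) else p

-- find_two_largest_num: left-to-right fold starting from (0, 0)
def pvFindTwoLargest (lst : List Int) : Int × Int :=
  lst.foldl pvStep (0, 0)

def replace_item_with_sum_of_two_largest (lst : List Int) : List Int :=
  let length := lst.length
  (List.range length).foldl (fun acc (i : Nat) =>
    let rest := PySem.List.slice acc (some ((i : Int) + 1)) none   -- lst[i + 1:]
    if (i : Int) > (length : Int) - 3 then
      acc.set i (-1)
    else
      let ms := pvFindTwoLargest rest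
      acc.set i (ms.1 + ms.2)) lst

-- ===== PORT B =====
-- right-to-left pass of Source B as structural recursion: returns (output list, (mx, sec))
def pvGo (l : List Int) : List Int × Int × Int :=
  match l with
  | [] => ([], 0, 0)
  | v :: rest =>
    let r := pvGo rest
    let mx := r.2.1
    let sec := r.2.2
    let val := if rest.length < 2 then (-1 : Int) else mx + sec
    let t := if v > mx then (v, mx) else if v > sec then (mx, v) else (mx, sec)
    (val :: r.1, t)

def replace_item_with_sum_of_two_largest_alt (lst : List Int) : List Int :=
  (pvGo lst).1

-- ===== PRECONDITION & SPEC =====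
def Spec_replace_item_with_sum_of_two_largest (lst : List Int) (out : List Int) : Prop := out = replace_item_with_sum_of_two_largest_alt lst
instance (lst : List Int) (out : List Int) : Decidable (Spec_replace_item_with_sum_of_two_largest lst out) := by unfold Spec_replace_item_with_sum_of_two_largest; infer_instance

-- ===== CLAIM (what is proved, stated in full; the proofs are below) =====
def Claim_equal_replace_item_with_sum_of_two_largest : Prop := ∀ (lst : List Int), Dom_replace_item_with_sum_of_two_largest lst → Spec_replace_item_with_sum_of_two_largest lst (replace_item_with_sum_of_two_largest lst)

-- ===== LEMMAS AND PROOFS =====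

-- the common specification value: what position i must hold
def pvSVal (orig : List Int) (i : Nat) : Int :=
  if (i : Int) > (orig.length : Int) - 3 then -1
  else (pvFindTwoLargest (orig.drop (i + 1))).1 + (pvFindTwoLargest (orig.drop (i + 1))).2

-- pvStep is right-commutative
lemma pvStep_comm (t : Int × Int) (a b : Int) :
    pvStep (pvStep t a) b = pvStep (pvStep t b) a := by
  obtain ⟨m, s⟩ := t
  simp only [pvStep]
  split_ifs <;> simp_all <;> omega

lemma foldr_pvStep (init : Int × Int) (v : Int) (l : List Int) :
    l.foldr (fun x t => pvStep t x) (pvStep init v) = pvStep (l.foldr (fun x t => pvStep t x) init) v := by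
  induction l with
  | nil => rfl
  | cons w l ih => simp only [List.foldr_cons, ih, pvStep_comm]

-- left-to-right fold = right-to-left fold for the two-largest tracker
lemma foldl_eq_foldr_pvStep (l : List Int) (init : Int × Int) :
    l.foldl pvStep init = l.foldr (fun x t => pvStep t x) init := by
  induction l generalizing init with
  | nil => rfl
  | cons v l ih => simp only [List.foldl_cons, List.foldr_cons, ih, foldr_pvStep]

lemma pvFindTwoLargest_cons (v : Int) (l : List Int) :
    pvFindTwoLargest (v :: l) = pvStep (pvFindTwoLargest l) v := by
  simp only [pvFindTwoLargest, foldl_eq_foldr_pvStep, List.foldr_cons]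

-- characterisation of B: pvGo returns the spec values and the tracker of the whole list
lemma pvGo_eq (l : List Int) :
    pvGo l = ((List.range l.length).map (pvSVal l), pvFindTwoLargest l) := by
  induction l with
  | nil => rfl
  | cons v rest ih =>
    simp only [pvGo, ih]
    rw [Prod.mk.injEq]
    constructor
    · -- output lists agree
      have hlen : (v :: rest).length = rest.length + 1 := rfl
      rw [hlen, List.range_succ_eq_map, List.map_cons, List.map_map]
      have hhead : pvSVal (v :: rest) 0 = if rest.length < 2 then (-1 : Int)
          else (pvFindTwoLargest rest).1 + (pvFindTwoLargest rest).2 := by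
        simp only [pvSVal, List.length_cons, List.drop_succ_cons, List.drop_zero]
        by_cases h : rest.length < 2
        · rw [if_pos (by push_cast; omega), if_pos h]
        · rw [if_neg (by push_cast; omega), if_neg h]
      rw [hhead]
      congr 1
      apply List.map_congr_left
      intro i _
      simp only [Function.comp_apply, pvSVal, List.length_cons, Nat.succ_eq_add_one,
        List.drop_succ_cons]
      have hc : ((i + 1 : Nat) : Int) > ((rest.length + 1 : Nat) : Int) - 3 ↔
          ((i : Nat) : Int) > ((rest.length : Nat) : Int) - 3 := by push_cast; omega
      by_cases h : ((i : Nat) : Int) > ((rest.length : Nat) : Int) - 3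
      · rw [if_pos h, if_pos (hc.mpr h)]
      · rw [if_neg h, if_neg (fun hh => h (hc.mp hh))]
    · -- trackers agree
      rw [pvFindTwoLargest_cons]
      simp only [pvStep]

-- A's loop invariant: folding the body over indices [k, k+m) of an accumulator that still
-- agrees with orig from position k on yields the processed prefix plus the spec values.
lemma pvA_invariant (orig : List Int) (m : Nat) : ∀ (k : Nat) (acc : List Int),
    acc.length = orig.length → acc.drop k = orig.drop k → k + m = orig.length →
    (List.range' k m).foldl (fun acc (i : Nat) =>
      if (i : Int) > (orig.length : Int) - 3 then acc.set i (-1)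
      else acc.set i ((pvFindTwoLargest (PySem.List.slice acc (some ((i : Int) + 1)) none)).1 +
        (pvFindTwoLargest (PySem.List.slice acc (some ((i : Int) + 1)) none)).2)) acc
    = acc.take k ++ (List.range' k m).map (pvSVal orig) := by
  induction m with
  | zero =>
    intro k acc hlen hdrop hk
    simp [List.take_of_length_le (show acc.length ≤ k by omega)]
  | succ m ih =>
    intro k acc hlen hdrop hk
    rw [List.range'_succ, List.foldl_cons, List.map_cons]
    have hkc : ((k : Int) + 1) = ((k + 1 : Nat) : Int) := by push_cast; ring
    have hslice : PySem.List.slice acc (some ((k : Int) + 1)) none = acc.drop (k + 1) := by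
      rw [hkc, PySem.List.slice_from_natCast]
    have hdrop1 : acc.drop (k + 1) = orig.drop (k + 1) := by
      simpa [List.drop_drop, Nat.add_comm] using congrArg (List.drop 1) hdrop
    have hbody : (if (k : Int) > (orig.length : Int) - 3 then acc.set k (-1)
        else acc.set k ((pvFindTwoLargest (PySem.List.slice acc (some ((k : Int) + 1)) none)).1 +
          (pvFindTwoLargest (PySem.List.slice acc (some ((k : Int) + 1)) none)).2))
        = acc.set k (pvSVal orig k) := by
      simp only [hslice, hdrop1, pvSVal]
      split_ifs <;> rfl
    rw [hbody]
    have hklt : k < acc.length := by omega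
    have hset_len : (acc.set k (pvSVal orig k)).length = orig.length := by simp [hlen]
    have hset_drop : (acc.set k (pvSVal orig k)).drop (k + 1) = orig.drop (k + 1) := by
      rw [List.drop_set, if_pos (by omega)]
      exact hdrop1
    rw [ih (k + 1) _ hset_len hset_drop (by omega)]
    have hts : (List.take k acc).length ≤ k := by
      rw [List.length_take]; exact min_le_left _ _
    have htake : (acc.set k (pvSVal orig k)).take (k + 1) = acc.take k ++ [pvSVal orig k] := by
      rw [List.take_add_one, List.take_set, List.set_eq_of_length_le hts,
        List.getElem?_set_self hklt]
      rfl
    rw [htake, List.append_assoc]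
    rfl

-- characterisation of A
lemma pvA_eq (lst : List Int) :
    replace_item_with_sum_of_two_largest lst = (List.range lst.length).map (pvSVal lst) := by
  have h := pvA_invariant lst lst.length 0 lst rfl rfl (by omega)
  simp only [List.take_zero, List.nil_append] at h
  simp only [replace_item_with_sum_of_two_largest]
  rw [List.range_eq_range']
  exact h

-- ===== VERDICT (by name: the statement is the Claim_ definition above) =====
theorem replace_item_with_sum_of_two_largest_spec : Claim_equal_replace_item_with_sum_of_two_largest := by
  intro lst _
  unfold Spec_replace_item_with_sum_of_two_largest replace_item_with_sum_of_two_largest_alt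
  rw [pvA_eq, pvGo_eq]
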